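-- pv_equiv track=rewrite | github.com/deepaktiwari09/Birds-Lat-Long | ebirdApi.py | remove_word
-- ===== SOURCE A (Python) =====
-- def remove_word(sentence:str,word_to_remove:str):
--     sent = sentence
--     index = sentence.find(word_to_remove)
--     re_len = [x+1 for x in range(0,len(word_to_remove))]
--     result = ""
--     if len(word_to_remove) != 1:
--         loop_val = True
--         while loop_val :
--             if index != -1: # founded
--                 a = []
--                 for x in range(0,len(sent)):
--                     if x != index and x not in [index + re_len[x] for x in range(0,len(re_len)-1)]:
--                         a.append(sent[x])
--                 sent = ""
--                 for y in range(0,len(a)):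
--                     sent = sent + str(a[y])
--
--                 index = sent.find(word_to_remove)
--
--                 if index == -1: # not founded
--                     result = sent
--
--                     break
--             if index == -1:
--                 result = ""
--                 break
--         return result
--     if len(word_to_remove) == 1:
--         return ""
-- ===== SOURCE B (Python) =====
-- def remove_word(sentence, word_to_remove):
--     # A's contract kept as-is: single-char words and absent words both yield "".
--     if len(word_to_remove) == 1 or word_to_remove not in sentence:
--         return ""
--     # single left-to-right pass: a stack from which each completed occurrence is popped
--     w = list(word_to_remove)
--     m = len(w)
--     stack = []
--     for ch in sentence:
--         stack.append(ch)
--         if stack[-m:] == w: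
--             del stack[-m:]
--     return "".join(stack)
-- ===== Notes on version B (the rewrite author's own statement) =====
-- stated objective: faster
-- what changed: Replaces A's while-loop (re-scan with find, rebuild the whole string via two index loops per deletion) with a single left-to-right pass that pushes characters on a stack and pops the word whenever it appears as the stack's suffix; A's special cases (empty result for a 1-char word or an absent word) are kept as one guard.
-- outside the precondition, e.g. on remove_word('abc', ''): A does not finish within the time limit, B returns 'abc'
import Mathlib
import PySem

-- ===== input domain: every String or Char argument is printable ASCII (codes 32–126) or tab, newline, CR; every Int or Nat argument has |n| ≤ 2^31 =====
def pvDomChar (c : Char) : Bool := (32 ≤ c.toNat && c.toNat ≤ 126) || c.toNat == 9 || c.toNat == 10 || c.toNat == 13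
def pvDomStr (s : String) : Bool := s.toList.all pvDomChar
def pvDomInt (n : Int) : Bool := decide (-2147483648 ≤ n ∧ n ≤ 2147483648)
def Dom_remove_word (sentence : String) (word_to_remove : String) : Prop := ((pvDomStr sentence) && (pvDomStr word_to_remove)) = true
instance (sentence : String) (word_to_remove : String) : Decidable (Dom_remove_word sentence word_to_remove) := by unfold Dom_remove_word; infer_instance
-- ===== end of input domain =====

-- B replaces A's find/rebuild while-loop by a single pass with a stack (popping the word when it
-- completes as the stack's suffix), keeping A's contract that 1-char and absent words yield "".

-- ===== PORT A =====
-- the 'while loop_val' body of A; fuel only makes the recursion total (each deletion shortens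
-- sent by len(word) ≥ 2 under Pre_, so fuel = len(sentence)+1 iterations are never exhausted;
-- Python A diverges exactly for word_to_remove = "", which Pre_ excludes)
def removeLoopA (word : List Char) (re_len : List Int) : Nat → List Char → Int → List Char
  | 0, _, _ => []
  | fuel+1, sent, index =>
    if index ≠ -1 then
      -- a = [sent[x] for x in range(0,len(sent)) if x != index and x not in [index+re_len[x] for x in range(0,len(re_len)-1)]]
      -- (the inner list does not depend on the outer x, so it is computed once;
      --  sent[x] and re_len[x] are in range for every produced x, so the default of pyGetD is never used)
      let banned := (PySem.List.pyRange 0 ((re_len.length : Int) - 1) 1).map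
          (fun x => index + PySem.List.pyGetD re_len x 0)
      let a := (PySem.List.pyRange 0 (sent.length : Int) 1).foldl
          (fun acc x => if x ≠ index ∧ x ∉ banned then acc ++ [PySem.List.pyGetD sent x ' '] else acc) []
      -- sent = ""; for y in range(0,len(a)): sent = sent + str(a[y])
      let sent2 := (PySem.List.pyRange 0 (a.length : Int) 1).foldl
          (fun s y => s ++ [PySem.List.pyGetD a y ' ']) []
      let index2 := PySem.Chars.find sent2 word
      if index2 = -1 then sent2 else removeLoopA word re_len fuel sent2 index2
    else []

def remove_word (sentence : String) (word_to_remove : String) : String :=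
  let sent := sentence.toList
  let word := word_to_remove.toList
  let index := PySem.Chars.find sent word
  let re_len := (PySem.List.pyRange 0 (word.length : Int) 1).map (fun x => x + 1)
  if word.length ≠ 1 then
    String.ofList (removeLoopA word re_len (sent.length + 1) sent index)
  else ""

-- ===== PORT B =====
def remove_word_alt (sentence : String) (word_to_remove : String) : String :=
  let w := word_to_remove.toList
  let m := w.length
  if w.length = 1 ∨ PySem.Str.isIn word_to_remove sentence = false then ""
  else
    let stack := sentence.toList.foldl (fun stack ch =>
      let st := stack ++ [ch]
      if PySem.List.slice st (some (-(m : Int))) none = w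
      then PySem.List.slice st none (some (-(m : Int)))
      else st) []
    String.ofList stack

-- ===== PRECONDITION & SPEC =====
-- Pre_ excludes only word_to_remove = "", on which Python A loops forever (find('') is always 0).
def Pre_remove_word (sentence : String) (word_to_remove : String) : Prop := word_to_remove ≠ ""
instance (sentence : String) (word_to_remove : String) : Decidable (Pre_remove_word sentence word_to_remove) := by unfold Pre_remove_word; infer_instance
def pvWitness_remove_word : String × String := ("abcabcb", "bc")

def Spec_remove_word (sentence : String) (word_to_remove : String) (out : String) : Prop := out = remove_word_alt sentence word_to_remove
instance (sentence : String) (word_to_remove : String) (out : String) : Decidable (Spec_remove_word sentence word_to_remove out) := by unfold Spec_remove_word; infer_instance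

-- ===== CLAIM (what is proved, stated in full; the proofs are below) =====
def Claim_equal_remove_word : Prop := ∀ (sentence : String) (word_to_remove : String), Dom_remove_word sentence word_to_remove → Pre_remove_word sentence word_to_remove → Spec_remove_word sentence word_to_remove (remove_word sentence word_to_remove)

-- ===== LEMMAS AND PROOFS =====

-- leftmost iterated deletion: the common semantics both loops are reduced to
def ldel (w : List Char) (s : List Char) : List Char :=
  if hw : w = [] then s
  else
    let i := PySem.Chars.find s w
    if hi : i = -1 then s
    else ldel w (s.take i.toNat ++ s.drop (i.toNat + w.length))
  termination_by s.length
  decreasing_by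
    have h0 : 0 ≤ PySem.Chars.find s w := by
      have := PySem.Chars.neg_one_le_find s w; omega
    have hspec := (PySem.Chars.find_spec h0).1
    have hw1 : 0 < w.length := List.length_pos_iff.mpr hw
    have hfl := PySem.Chars.find_le_length s w
    have hlen : (PySem.Chars.find s w).toNat + w.length ≤ s.length := by
      have h2 := hspec.length_le
      rw [List.length_drop] at h2
      omega
    rw [List.length_append, List.length_take, List.length_drop]
    omega

lemma ldel_of_not_infix {w s : List Char} (h : ¬ w <:+: s) : ldel w s = s := by
  unfold ldel
  by_cases hw : w = []
  · simp [hw]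
  · simp [hw, (PySem.Chars.find_eq_neg_one_iff s w).2 h]

lemma ldel_step {w s : List Char} {k : Nat} (hw : w ≠ [])
    (hfind : PySem.Chars.find s w = (k : Int)) :
    ldel w s = ldel w (s.take k ++ s.drop (k + w.length)) := by
  conv_lhs => rw [ldel]
  have hk : ((k : Int)) ≠ -1 := by omega
  simp [hw, hfind, hk]

lemma find_eq_of_first {s w : List Char} {k : Nat}
    (h1 : w <+: s.drop k) (h2 : ∀ j < k, ¬ w <+: s.drop j) :
    PySem.Chars.find s w = (k : Int) := by
  have hinf : w <:+: s := h1.isInfix.trans (List.drop_suffix k s).isInfix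
  have hne : PySem.Chars.find s w ≠ -1 := (PySem.Chars.find_ne_neg_one_iff s w).2 hinf
  have h0 : 0 ≤ PySem.Chars.find s w := by
    have := PySem.Chars.neg_one_le_find s w; omega
  obtain ⟨ha, hb⟩ := PySem.Chars.find_spec h0
  have hk : (PySem.Chars.find s w).toNat = k := by
    rcases Nat.lt_trichotomy (PySem.Chars.find s w).toNat k with h | h | h
    · exact absurd ha (h2 _ h)
    · exact h
    · exact absurd h1 (hb k h)
  omega

-- an occurrence lying entirely inside the prefix u of u ++ r is an occurrence in u
lemma infix_of_prefix_drop {w u : List Char} (r : List Char) {j : Nat}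
    (hle : j + w.length ≤ u.length) (h : w <+: (u ++ r).drop j) : w <:+: u := by
  have hju : j ≤ u.length := by omega
  rw [List.drop_append_of_le_length hju] at h
  rw [List.prefix_iff_eq_take] at h
  rw [List.take_append_of_le_length (by rw [List.length_drop]; omega)] at h
  rw [h]
  exact ((List.take_prefix _ _).isInfix).trans (List.drop_suffix j u).isInfix

-- one stack step that fires removes exactly the leftmost occurrence
lemma stack_step_eq {w u u' : List Char} {c : Char} (r : List Char)
    (hu : ¬ w <:+: u) (heq : u ++ [c] = u' ++ w) :
    PySem.Chars.find (u ++ c :: r) w = (u'.length : Int) := by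
  have hfull : u ++ c :: r = u' ++ (w ++ r) := by
    rw [show u ++ c :: r = (u ++ [c]) ++ r by simp, heq, List.append_assoc]
  have hlen : u'.length + w.length = u.length + 1 := by
    have := congrArg List.length heq; simpa using this.symm
  apply find_eq_of_first
  · rw [hfull, List.drop_left]; exact List.prefix_append w r
  · intro j hj hpref
    exact hu (infix_of_prefix_drop (r := c :: r) (h := hpref) (hle := by omega))

lemma not_infix_append_singleton {w u : List Char} (c : Char)
    (hu : ¬ w <:+: u) (hs : ¬ w <:+ (u ++ [c])) : ¬ w <:+: (u ++ [c]) := by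
  rintro ⟨s, t, hst⟩
  rcases List.eq_nil_or_concat t with ht | ⟨t', d, ht⟩
  · subst ht
    exact hs ⟨s, by simpa using hst⟩
  · subst ht
    have h2 : (s ++ w ++ t') ++ [d] = u ++ [c] := by simpa using hst
    have h3 : s ++ w ++ t' = u := by
      have := List.append_inj_left' h2 rfl
      simpa using this
    exact hu ⟨s, t', by simpa using h3⟩

-- B's stack pass computes leftmost iterated deletion
lemma stack_eq_ldel (w : List Char) (hw : w ≠ []) :
    ∀ (r u : List Char), ¬ w <:+: u →
      r.foldl (fun stack ch =>
        let st := stack ++ [ch]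
        if PySem.List.slice st (some (-(w.length : Int))) none = w
        then PySem.List.slice st none (some (-(w.length : Int)))
        else st) u = ldel w (u ++ r) := by
  intro r
  induction r with
  | nil =>
    intro u hu
    simpa using (ldel_of_not_infix hu).symm
  | cons c r' ih =>
    intro u hu
    have hm : 0 < w.length := List.length_pos_iff.mpr hw
    rw [List.foldl_cons]
    by_cases hmatch : (u ++ [c]).drop ((u ++ [c]).length - w.length) = w
    · -- the word completes as the stack's suffix: pop it = delete the leftmost occurrence
      set u' := (u ++ [c]).take ((u ++ [c]).length - w.length) with hu'def
      have happ : (let st := u ++ [c];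
          if PySem.List.slice st (some (-(w.length : Int))) none = w
          then PySem.List.slice st none (some (-(w.length : Int)))
          else st) = u' := by
        simp only []
        rw [PySem.List.slice_from_neg_natCast _ w.length hm,
            PySem.List.slice_to_neg_natCast _ w.length hm, if_pos hmatch]
      have heq : u ++ [c] = u' ++ w := by
        conv_lhs => rw [← List.take_append_drop ((u ++ [c]).length - w.length) (u ++ [c])]
        rw [hmatch]
      have hlen : u'.length + w.length = u.length + 1 := by
        have := congrArg List.length heq; simpa using this.symm
      have hu'pref : u' = u.take ((u ++ [c]).length - w.length) := by
        rw [hu'def, List.take_append_of_le_length (by simp; omega)]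
      have hu' : ¬ w <:+: u' := fun hinf =>
        hu (hinf.trans (by rw [hu'pref]; exact (List.take_prefix _ _).isInfix))
      have hfind := stack_step_eq (w := w) (u := u) (u' := u') r' hu heq
      have hfull : u ++ c :: r' = u' ++ w ++ r' := by
        rw [show u ++ c :: r' = (u ++ [c]) ++ r' by simp, heq]
      have htake : (u ++ c :: r').take u'.length = u' := by
        rw [hfull, List.append_assoc, List.take_left]
      have hdrop : (u ++ c :: r').drop (u'.length + w.length) = r' := by
        rw [hfull, show u' ++ w ++ r' = (u' ++ w) ++ r' by simp,
            show u'.length + w.length = (u' ++ w).length by simp, List.drop_left]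
      rw [happ, ih u' hu', ldel_step hw hfind, htake, hdrop]
    · -- no suffix match: push and continue
      have happ : (let st := u ++ [c];
          if PySem.List.slice st (some (-(w.length : Int))) none = w
          then PySem.List.slice st none (some (-(w.length : Int)))
          else st) = u ++ [c] := by
        simp only []
        rw [PySem.List.slice_from_neg_natCast _ w.length hm, if_neg hmatch]
      have hnot : ¬ w <:+ (u ++ [c]) := fun hsuf =>
        hmatch (List.suffix_iff_eq_drop.mp hsuf).symm
      have hu2 := not_infix_append_singleton c hu hnot
      rw [happ, ih (u ++ [c]) hu2]
      simp

-- A's comprehension removal step = take/drop around the found index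
lemma map_getD_range_shift (s : List Char) (o k : Nat) (h : o + k ≤ s.length) :
    (List.range k).map (fun j => s.getD (o + j) ' ') = (s.drop o).take k := by
  apply List.ext_getElem
  · simp; omega
  · intro t h1 h2
    have ht : t < k := by simpa using h1
    simp only [List.getElem_map, List.getElem_range, List.getElem_take, List.getElem_drop]
    rw [List.getD_eq_getElem?_getD, List.getElem?_eq_getElem (by omega)]
    simp

lemma removal_step_eq (word sent : List Char) (i : Nat)
    (hm : 2 ≤ word.length) (hle : i + word.length ≤ sent.length) :
    ((PySem.List.pyRange 0 (sent.length : Int) 1).foldl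
      (fun acc x => if x ≠ (i : Int) ∧ x ∉ ((PySem.List.pyRange 0 ((((PySem.List.pyRange 0 (word.length : Int) 1).map (fun x => x + 1)).length : Int) - 1) 1).map
          (fun x => (i : Int) + PySem.List.pyGetD ((PySem.List.pyRange 0 (word.length : Int) 1).map (fun x => x + 1)) x 0))
        then acc ++ [PySem.List.pyGetD sent x ' '] else acc) [])
      = sent.take i ++ sent.drop (i + word.length) := by
  set n := sent.length with hn
  set m := word.length with hmdef
  set re_len := (PySem.List.pyRange 0 (m : Int) 1).map (fun x => x + 1) with hre
  have hrl : re_len.length = m := by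
    simp [hre, PySem.List.pyRange_one]
  set banned := (PySem.List.pyRange 0 ((re_len.length : Int) - 1) 1).map
      (fun x => (i : Int) + PySem.List.pyGetD re_len x 0) with hban
  have hmem : ∀ x : Int, x ∈ banned ↔ ((i : Int) + 1 ≤ x ∧ x < (i : Int) + m) := by
    intro x
    rw [hban]
    simp only [List.mem_map, PySem.List.mem_pyRange_one]
    constructor
    · rintro ⟨y, ⟨hy0, hy1⟩, rfl⟩
      rw [hrl] at hy1
      rw [hre, PySem.List.pyGetD_map_pyRange_of_nonneg _ _ _ _ hy0 (by omega)]
      omega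
    · intro ⟨h1, h2⟩
      refine ⟨x - i - 1, ⟨by omega, by rw [hrl]; omega⟩, ?_⟩
      rw [hre, PySem.List.pyGetD_map_pyRange_of_nonneg _ _ _ _ (by omega) (by omega)]
      omega
  have hfun : (fun (acc : List Char) (x : Int) =>
        if x ≠ (i : Int) ∧ x ∉ banned then acc ++ [PySem.List.pyGetD sent x ' '] else acc)
      = (fun acc x => if (fun x : Int => decide (x ≠ (i : Int) ∧ x ∉ banned)) x = true
          then acc ++ [(fun x : Int => PySem.List.pyGetD sent x ' ') x] else acc) := by
    funext acc x; simp
  rw [hfun, PySem.List.foldl_append_if]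
  have hr : PySem.List.pyRange 0 (n : Int) 1 = (List.range n).map (fun k : Nat => (k : Int)) := by
    rw [PySem.List.pyRange_one]; simp
  rw [hr, List.filter_map, List.map_map]
  have hq : ((fun x : Int => decide (x ≠ (i : Int) ∧ x ∉ banned)) ∘ (fun k : Nat => (k : Int)))
      = fun k : Nat => decide (¬ (i ≤ k ∧ k < i + m)) := by
    funext k
    simp only [Function.comp_apply]
    rw [decide_eq_decide]
    rw [hmem]
    omega
  have hsplit : List.range n
      = List.range i ++ ((List.range m).map (i + ·)
        ++ (List.range (n - i - m)).map (fun x => i + (m + x))) := by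
    have h1 : List.range n = List.range (i + (m + (n - i - m))) := by
      congr 1; omega
    rw [h1, List.range_add, List.range_add, List.map_append, List.map_map]
    rfl
  rw [hq, hsplit, List.filter_append, List.filter_append]
  have hf1 : (List.range i).filter (fun k => decide (¬ (i ≤ k ∧ k < i + m))) = List.range i :=
    List.filter_eq_self.mpr (by intro a ha; simp at ha ⊢; omega)
  have hf2 : ((List.range m).map (i + ·)).filter (fun k => decide (¬ (i ≤ k ∧ k < i + m))) = [] :=
    List.filter_eq_nil_iff.mpr (by rintro a ha; simp at ha ⊢; obtain ⟨y, hy, rfl⟩ := ha; omega)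
  have hf3 : ((List.range (n - i - m)).map (fun x => i + (m + x))).filter
        (fun k => decide (¬ (i ≤ k ∧ k < i + m))) = (List.range (n - i - m)).map (fun x => i + (m + x)) :=
    List.filter_eq_self.mpr (by rintro a ha; simp at ha ⊢; obtain ⟨y, hy, rfl⟩ := ha; omega)
  rw [hf1, hf2, hf3]
  simp only [List.nil_append, List.map_append, List.map_map]
  have hcomp1 : ((fun x : Int => PySem.List.pyGetD sent x ' ') ∘ (fun k : Nat => (k : Int)))
      = fun k : Nat => sent.getD k ' ' := by
    funext k; simp [PySem.List.pyGetD_natCast]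
  have hpiece1 : (List.range i).map ((fun x : Int => PySem.List.pyGetD sent x ' ') ∘ (fun k : Nat => (k : Int)))
      = sent.take i := by
    rw [hcomp1]
    have := map_getD_range_shift sent 0 i (by omega)
    simpa using this
  have hpiece2 : (List.range (n - i - m)).map
        (((fun x : Int => PySem.List.pyGetD sent x ' ') ∘ (fun k : Nat => (k : Int))) ∘ (fun x => i + (m + x)))
      = sent.drop (i + m) := by
    rw [hcomp1]
    have h2 : (((fun k : Nat => sent.getD k ' ')) ∘ (fun x => i + (m + x)))
        = fun j : Nat => sent.getD ((i + m) + j) ' ' := by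
      funext j; simp only [Function.comp_apply, Nat.add_assoc]
    rw [h2, map_getD_range_shift sent (i + m) (n - i - m) (by omega)]
    apply List.take_of_length_le
    simp
    omega
  rw [hpiece1, hpiece2]

-- A's loop computes leftmost iterated deletion (when the word was found)
lemma loopA_eq_ldel (word : List Char) (hm : 2 ≤ word.length) :
    ∀ (fuel : Nat) (sent : List Char), sent.length < fuel →
      PySem.Chars.find sent word ≠ -1 →
      removeLoopA word ((PySem.List.pyRange 0 (word.length : Int) 1).map (fun x => x + 1))
        fuel sent (PySem.Chars.find sent word) = ldel word sent := by
  intro fuel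
  induction fuel with
  | zero => intro sent hlt hne; omega
  | succ fuel ih =>
    intro sent hlt hne
    have hwne : word ≠ [] := by intro h; rw [h] at hm; simp at hm
    have h0 : 0 ≤ PySem.Chars.find sent word := by
      have := PySem.Chars.neg_one_le_find sent word; omega
    have hfind : PySem.Chars.find sent word = ((PySem.Chars.find sent word).toNat : Int) := by omega
    set i := (PySem.Chars.find sent word).toNat with hidef
    obtain ⟨hpref, -⟩ := PySem.Chars.find_spec h0
    have hle : i + word.length ≤ sent.length := by
      have := hpref.length_le; rw [List.length_drop] at this; omega
    rw [removeLoopA, hfind]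
    simp only []
    rw [if_pos (by omega : ((i : Int) ≠ -1))]
    have hreb : ∀ xs : List Char,
        (PySem.List.pyRange 0 (xs.length : Int) 1).foldl
          (fun s y => s ++ [PySem.List.pyGetD xs y ' ']) [] = xs := by
      intro xs
      have h1 := PySem.List.foldl_pyRange_zero_pyGetD xs ' ' (fun acc c => acc ++ [c]) []
      simp only [PySem.List.len] at h1
      rw [h1, PySem.List.foldl_append_singleton]
      simp
    rw [removal_step_eq word sent i hm hle, hreb]
    rw [ldel_step hwne hfind]
    by_cases hfx : PySem.Chars.find (sent.take i ++ sent.drop (i + word.length)) word = -1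
    · rw [if_pos hfx]
      exact (ldel_of_not_infix ((PySem.Chars.find_eq_neg_one_iff _ word).mp hfx)).symm
    · rw [if_neg hfx]
      have hXlen : (sent.take i ++ sent.drop (i + word.length)).length < fuel := by
        rw [List.length_append, List.length_take, List.length_drop]
        omega
      exact ih _ hXlen hfx

-- ===== VERDICT (by name: the statement is the Claim_ definition above) =====
theorem remove_word_spec : Claim_equal_remove_word := by
  unfold Claim_equal_remove_word Spec_remove_word Pre_remove_word
  intro sentence word _ hpre
  have hwl : word.toList ≠ [] := fun h => hpre (String.toList_eq_nil_iff.mp h)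
  dsimp only [remove_word, remove_word_alt]
  by_cases h1 : word.toList.length = 1
  · rw [if_neg (not_not_intro h1), if_pos (Or.inl h1)]
  · have hm : 2 ≤ word.toList.length := by
      have hz : word.toList.length ≠ 0 := fun h => hwl (List.length_eq_zero_iff.mp h)
      omega
    rw [if_pos h1]
    by_cases h2 : PySem.Str.isIn word sentence = false
    · -- word absent: A's loop exits at once with "", B's guard returns ""
      have hninf : ¬ word.toList <:+: sentence.toList := by
        intro hinf
        rw [← PySem.Str.isIn_iff_infix] at hinf
        rw [hinf] at h2
        simp at h2
      have hfind : PySem.Chars.find sentence.toList word.toList = -1 :=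
        (PySem.Chars.find_eq_neg_one_iff _ _).mpr hninf
      rw [hfind, if_pos (Or.inr h2), removeLoopA]
      simp
    · -- word present: both sides compute leftmost iterated deletion
      have h2t : PySem.Str.isIn word sentence = true := by
        cases hb : PySem.Str.isIn word sentence
        · exact absurd hb h2
        · rfl
      have hinf : word.toList <:+: sentence.toList := (PySem.Str.isIn_iff_infix _ _).mp h2t
      have hne : PySem.Chars.find sentence.toList word.toList ≠ -1 :=
        (PySem.Chars.find_ne_neg_one_iff _ _).mpr hinf
      rw [if_neg (by rintro (h | h); exacts [h1 h, h2 h])]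
      rw [loopA_eq_ldel word.toList hm (sentence.toList.length + 1) sentence.toList
        (by omega) hne]
      rw [stack_eq_ldel word.toList hwl sentence.toList []
        (fun h => hwl (List.infix_nil.mp h))]
      simp
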